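-- pv_equiv track=rewrite | github.com/rerun-io/rerun | scripts/ci/update_pr_body.py | insert_code_blocks
-- ===== SOURCE A (Python) =====
-- CODE_BLOCK_PLACEHOLDER = "{CODE BLOCK PLACEHOLDER}"
--
-- def insert_lines(lines: list[str], lines_to_insert: list[str], start_from: int) -> None:
--     insert_pt = start_from
--     for line in lines_to_insert:
--         lines.insert(insert_pt, line)
--         insert_pt = insert_pt + 1
--
-- def insert_code_blocks(lines: list[str], code_blocks: list[list[str]]) -> list[str]:
--     has_placeholders = True
--     while has_placeholders:
--         if CODE_BLOCK_PLACEHOLDER in lines: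
--             idx = lines.index(CODE_BLOCK_PLACEHOLDER)
--             try:
--                 block = code_blocks.pop(0)
--                 insert_lines(lines, block, idx + 1)
--                 del lines[idx]
--             except IndexError:
--                 lines[idx] = "{Error: Couldn't re-insert code-block}"
--         else:
--             has_placeholders = False
--     return lines
-- ===== SOURCE B (Python) =====
-- CODE_BLOCK_PLACEHOLDER = "{CODE BLOCK PLACEHOLDER}"
--
-- def insert_code_blocks(lines, code_blocks):
--     # Single pass with an explicit worklist stack; inserted block lines are
--     # pushed onto the stack so they are re-scanned, matching the restart-scan semantics.
--     out = []
--     stack = list(reversed(lines))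
--     bi = 0
--     while stack:
--         line = stack.pop()
--         if line == CODE_BLOCK_PLACEHOLDER:
--             if bi < len(code_blocks):
--                 stack.extend(reversed(code_blocks[bi]))
--                 bi += 1
--             else:
--                 out.append("{Error: Couldn't re-insert code-block}")
--         else:
--             out.append(line)
--     return out
-- ===== Notes on version B (the rewrite author's own statement) =====
-- stated objective: alternative
-- what changed: A repeatedly restarts from the top (membership test, list.index, element-by-element list.insert and del per placeholder); B makes one left-to-right pass with an explicit worklist stack onto which inserted block lines are pushed for re-scanning, building the output once.
import Mathlib
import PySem

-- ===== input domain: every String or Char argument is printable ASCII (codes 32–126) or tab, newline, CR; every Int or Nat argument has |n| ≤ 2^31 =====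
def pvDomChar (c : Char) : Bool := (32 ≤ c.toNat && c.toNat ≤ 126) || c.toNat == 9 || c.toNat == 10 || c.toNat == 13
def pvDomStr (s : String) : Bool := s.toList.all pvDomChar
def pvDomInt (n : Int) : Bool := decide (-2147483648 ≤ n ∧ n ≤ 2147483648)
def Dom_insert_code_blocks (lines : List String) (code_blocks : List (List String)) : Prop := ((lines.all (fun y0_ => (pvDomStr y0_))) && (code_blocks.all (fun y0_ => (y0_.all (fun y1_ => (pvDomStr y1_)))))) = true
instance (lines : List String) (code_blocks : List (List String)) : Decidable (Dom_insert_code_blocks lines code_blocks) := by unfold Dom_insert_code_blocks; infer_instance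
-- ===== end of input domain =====

-- B replaces A's restart-the-scan-from-the-top loop (each round does a fresh `in`/`index`/
-- `insert`/`del` pass over the whole list) by a single left-to-right pass with an explicit
-- worklist stack that builds the output once.
-- NOTE on side effects: Python A mutates `lines` and `code_blocks` in place (insert/del/pop);
-- B mutates neither. The equivalence proved here is about the RETURN value only.

def pvPH : String := "{CODE BLOCK PLACEHOLDER}"
def pvERR : String := "{Error: Couldn't re-insert code-block}"

-- ===== PORT A =====
-- insert_lines: for line in lines_to_insert: lines.insert(insert_pt, line); insert_pt += 1
def pvInsertLines (lines : List String) (lines_to_insert : List String) (start_from : Int) : List String :=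
  (lines_to_insert.foldl (fun (st : List String × Int) line =>
      (PySem.List.insert st.1 st.2 line, st.2 + 1)) (lines, start_from)).1

-- termination measure for A's while-loop: placeholders left in `lines` plus, for each
-- remaining block, its placeholders plus one
def pvMeasA (lines : List String) (blocks : List (List String)) : Nat :=
  lines.count pvPH + (blocks.map (fun b => b.count pvPH + 1)).sum

-- facts the while-loop's termination proof needs (stated above the def, cited by name)
theorem pvInsertLines_decomp (pre suf b : List String) (y : String) :
    pvInsertLines (pre ++ y :: suf) b ((pre.length : Int) + 1) = pre ++ y :: (b ++ suf) := by
  suffices h : ∀ (b lines : List String) (k : Nat), k ≤ lines.length →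
      pvInsertLines lines b (k : Int) = lines.take k ++ b ++ lines.drop k by
    have := h b (pre ++ y :: suf) (pre.length + 1) (by simp)
    rw [show ((pre.length : Int) + 1) = ((pre.length + 1 : Nat) : Int) by push_cast; ring]
    rw [this]
    have ht : (pre ++ y :: suf).take (pre.length + 1) = pre ++ [y] := by
      rw [show pre ++ y :: suf = (pre ++ [y]) ++ suf by simp]
      exact List.take_left' (by simp)
    have hd : (pre ++ y :: suf).drop (pre.length + 1) = suf := by
      rw [show pre ++ y :: suf = (pre ++ [y]) ++ suf by simp]
      exact List.drop_left' (by simp)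
    rw [ht, hd]; simp
  intro b
  induction b with
  | nil => intro lines k hk; simp [pvInsertLines]
  | cons x b ih =>
    intro lines k hk
    have hins : PySem.List.insert lines (k : Int) x = lines.take k ++ x :: lines.drop k :=
      PySem.List.insert_natCast lines k x hk
    have hfold : pvInsertLines lines (x :: b) (k : Int)
        = pvInsertLines (PySem.List.insert lines (k : Int) x) b ((k : Int) + 1) := by
      simp [pvInsertLines, List.foldl_cons]
    rw [hfold, hins]
    rw [show ((k : Int) + 1) = ((k + 1 : Nat) : Int) by push_cast; ring]
    rw [ih (lines.take k ++ x :: lines.drop k) (k + 1)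
        (by simp; omega)]
    have ht : (lines.take k ++ x :: lines.drop k).take (k + 1) = lines.take k ++ [x] := by
      rw [show lines.take k ++ x :: lines.drop k = (lines.take k ++ [x]) ++ lines.drop k by simp]
      exact List.take_left' (by simp [List.length_take]; omega)
    have hd : (lines.take k ++ x :: lines.drop k).drop (k + 1) = lines.drop k := by
      rw [show lines.take k ++ x :: lines.drop k = (lines.take k ++ [x]) ++ lines.drop k by simp]
      exact List.drop_left' (by simp [List.length_take]; omega)
    rw [ht, hd]; simp

theorem pvIndex_decomp {lines : List String} {idx : Nat}
    (h : PySem.List.index? lines pvPH = some idx) :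
    ∃ pre suf, lines = pre ++ pvPH :: suf ∧ pre.length = idx ∧ pvPH ∉ pre :=
  (PySem.List.index?_eq_some_iff _ _ _).1 h

theorem pvErase_decomp (pre suf : List String) (y : String) :
    (pre ++ y :: suf).eraseIdx pre.length = pre ++ suf := by
  simp [List.eraseIdx_append_of_length_le]

-- the while-loop of insert_code_blocks (A restarts the scan each round).
-- `lines.index(PH)` runs after the `in` check, so it cannot raise: ported as index? with getD.
-- `del lines[idx]` is ported as eraseIdx (exact: idx is a valid index by construction).
def pvLoopA (lines : List String) (code_blocks : List (List String)) : List String :=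
  if pvPH ∈ lines then
    match code_blocks with
    | [] =>
      -- lines[idx] = "{Error: …}"
      pvLoopA (lines.set ((PySem.List.index? lines pvPH).getD 0) pvERR) []
    | b :: bs =>
      -- insert_lines(lines, block, idx+1); del lines[idx]
      pvLoopA ((pvInsertLines lines b
          ((((PySem.List.index? lines pvPH).getD 0 : Nat) : Int) + 1)).eraseIdx
          ((PySem.List.index? lines pvPH).getD 0)) bs
  else lines
termination_by pvMeasA lines code_blocks
decreasing_by
  · -- error case
    rename_i h
    obtain ⟨k, hk⟩ := (PySem.List.index?_isSome_iff lines pvPH).2 h |> Option.isSome_iff_exists.1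
    obtain ⟨pre, suf, hl, hlen, _⟩ := pvIndex_decomp hk
    subst hl; subst hlen
    rw [hk]
    have hset : ((pre ++ pvPH :: suf).set ((some pre.length).getD 0) pvERR)
        = pre ++ pvERR :: suf := by simp
    rw [hset]
    simp [pvMeasA, List.count_append]
    have : pvERR ≠ pvPH := by decide
    simp [this]
  · -- block case
    rename_i h
    obtain ⟨k, hk⟩ := (PySem.List.index?_isSome_iff lines pvPH).2 h |> Option.isSome_iff_exists.1
    obtain ⟨pre, suf, hl, hlen, _⟩ := pvIndex_decomp hk
    subst hl; subst hlen
    rw [hk]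
    simp only [Option.getD_some]
    rw [pvInsertLines_decomp pre suf _ pvPH]
    rw [pvErase_decomp pre (_ ++ suf) pvPH]
    simp [pvMeasA, List.count_append]
    omega

def insert_code_blocks (lines : List String) (code_blocks : List (List String)) : List String :=
  pvLoopA lines code_blocks

-- ===== PORT B =====
-- worklist loop of Source B: out = acc (reversed), stack = rest (top first), remaining blocks
-- (Source B advances an index bi into code_blocks; ported as the remaining suffix of the list)
def pvGoB (acc : List String) (rest : List String) (blocks : List (List String)) : List String :=
  match rest with
  | [] => acc.reverse
  | l :: rs =>
    if l = pvPH then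
      match blocks with
      | [] => pvGoB (pvERR :: acc) rs []
      | b :: bs => pvGoB acc (b ++ rs) bs
    else pvGoB (l :: acc) rs blocks
termination_by rest.length + (blocks.map (fun b => b.length + 1)).sum
decreasing_by
  · simp
  · simp; omega
  · simp

def insert_code_blocks_alt (lines : List String) (code_blocks : List (List String)) : List String :=
  pvGoB [] lines code_blocks

-- ===== PRECONDITION & SPEC =====
def Spec_insert_code_blocks (lines : List String) (code_blocks : List (List String)) (out : List String) : Prop := out = insert_code_blocks_alt lines code_blocks
instance (lines : List String) (code_blocks : List (List String)) (out : List String) : Decidable (Spec_insert_code_blocks lines code_blocks out) := by unfold Spec_insert_code_blocks; infer_instance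

-- ===== CLAIM (what is proved, stated in full; the proofs are below) =====
def Claim_equal_insert_code_blocks : Prop := ∀ (lines : List String) (code_blocks : List (List String)), Dom_insert_code_blocks lines code_blocks → Spec_insert_code_blocks lines code_blocks (insert_code_blocks lines code_blocks)

-- ===== LEMMAS AND PROOFS =====

-- the invariant: A's whole-list state is B's processed prefix (reversed acc, placeholder-free)
-- followed by B's worklist stack
theorem pvLoopA_eq_goB : ∀ (acc rest : List String) (blocks : List (List String)),
    pvPH ∉ acc → pvLoopA (acc.reverse ++ rest) blocks = pvGoB acc rest blocks := by
  intro acc rest blocks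
  induction acc, rest, blocks using pvGoB.induct with
  | case1 acc blocks =>
    intro hacc
    rw [pvLoopA.eq_def, pvGoB]
    rw [if_neg (by simpa using hacc)]
    simp
  | case2 acc rs ih =>
    intro hacc
    rw [pvLoopA.eq_def]
    rw [if_pos (by simp : pvPH ∈ acc.reverse ++ pvPH :: rs)]
    have hidx : PySem.List.index? (acc.reverse ++ pvPH :: rs) pvPH = some acc.reverse.length := by
      rw [PySem.List.index?_eq_some_iff]
      exact ⟨acc.reverse, rs, rfl, rfl, by simpa using hacc⟩
    rw [hidx]
    simp only [Option.getD_some]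
    have hset : (acc.reverse ++ pvPH :: rs).set acc.reverse.length pvERR
        = acc.reverse ++ pvERR :: rs := by simp
    rw [hset]
    rw [pvGoB]
    have h2 : acc.reverse ++ pvERR :: rs = (pvERR :: acc).reverse ++ rs := by simp
    rw [h2]
    exact ih (by
      intro h
      rcases List.mem_cons.1 h with h | h
      · exact absurd h.symm (by decide)
      · exact hacc h)
  | case3 acc rs b bs ih =>
    intro hacc
    rw [pvLoopA.eq_def]
    rw [if_pos (by simp : pvPH ∈ acc.reverse ++ pvPH :: rs)]
    have hidx : PySem.List.index? (acc.reverse ++ pvPH :: rs) pvPH = some acc.reverse.length := by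
      rw [PySem.List.index?_eq_some_iff]
      exact ⟨acc.reverse, rs, rfl, rfl, by simpa using hacc⟩
    rw [hidx]
    simp only [Option.getD_some]
    rw [pvInsertLines_decomp acc.reverse rs b pvPH]
    rw [pvErase_decomp acc.reverse (b ++ rs) pvPH]
    rw [pvGoB]
    exact ih hacc
  | case4 acc blocks l rs hl ih =>
    intro hacc
    have h2 : acc.reverse ++ l :: rs = (l :: acc).reverse ++ rs := by simp
    rw [h2]
    rw [pvGoB.eq_def]; simp only [if_neg hl]
    exact ih (by
      intro h
      rcases List.mem_cons.1 h with h | h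
      · exact hl h.symm
      · exact hacc h)

-- ===== VERDICT (by name: the statement is the Claim_ definition above) =====
theorem insert_code_blocks_spec : Claim_equal_insert_code_blocks := by
  intro lines code_blocks _
  unfold Spec_insert_code_blocks insert_code_blocks insert_code_blocks_alt
  simpa using pvLoopA_eq_goB [] lines code_blocks (by simp)
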